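-- pv_equiv track=rewrite | github.com/lielserf/Search-in-Artificial-Intelligence---project | maze_main_man.py | g_h
-- ===== SOURCE A (Python) =====
-- def g_h(queue, num_sec_tie):
--     best_g = min(queue, key=lambda tup: tup[2])[2]
--     nodes_with_best_g = [val for val in queue if val[2] == best_g]
--     if len(nodes_with_best_g) > 1:
--         num_sec_tie += 1
--         best_h = min([val[4] for val in nodes_with_best_g])
--         nodes_with_best_h = [val for val in nodes_with_best_g if val[4] == best_h]
--         node = nodes_with_best_h[0]
--     else:
--         node = nodes_with_best_g[0]
--     return node, num_sec_tie
-- ===== SOURCE B (Python) =====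
-- def g_h(queue, num_sec_tie):
--     if not queue:
--         raise ValueError("min() arg is an empty sequence")
--     best = queue[0]
--     count = 1
--     for t in queue[1:]:
--         if t[2] < best[2]:
--             best, count = t, 1
--         elif t[2] == best[2]:
--             count += 1
--             if t[4] < best[4]:
--                 best = t
--     return best, (num_sec_tie + 1 if count > 1 else num_sec_tie)
-- ===== Notes on version B (the rewrite author's own statement) =====
-- stated objective: alternative
-- what changed: Replaces A's four passes (min by g, filter by g, min of h, filter by h, index 0) by a single left-to-right fold that keeps the current lexicographically (g,h)-minimal node (first wins on ties) together with a running count of min-g elements.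
import Mathlib
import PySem

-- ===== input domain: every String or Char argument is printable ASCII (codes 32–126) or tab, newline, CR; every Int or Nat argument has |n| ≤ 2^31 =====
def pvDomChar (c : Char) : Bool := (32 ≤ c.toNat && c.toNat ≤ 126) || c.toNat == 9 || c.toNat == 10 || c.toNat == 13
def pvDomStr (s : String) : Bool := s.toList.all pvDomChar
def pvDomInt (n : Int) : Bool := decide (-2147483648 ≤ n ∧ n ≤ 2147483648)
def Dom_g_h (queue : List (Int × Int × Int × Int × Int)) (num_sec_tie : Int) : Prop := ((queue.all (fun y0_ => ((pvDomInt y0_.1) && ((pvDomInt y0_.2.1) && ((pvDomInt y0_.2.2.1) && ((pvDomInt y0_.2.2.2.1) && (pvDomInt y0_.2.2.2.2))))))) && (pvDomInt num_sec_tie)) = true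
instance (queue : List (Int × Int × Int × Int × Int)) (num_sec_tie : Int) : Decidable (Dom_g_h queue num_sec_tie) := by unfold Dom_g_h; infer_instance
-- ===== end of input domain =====

-- B replaces A's five passes over the queue (min by g, filter by g, min of h, filter by h,
-- index 0) by a single left-to-right fold keeping the current (g,h)-lex-minimal node
-- (first wins on ties) and a running count of min-g elements; same O(n) cost, one pass.

-- ===== PORT A =====
def g_h (queue : List (Int × Int × Int × Int × Int)) (num_sec_tie : Int) : (Int × Int × Int × Int × Int) × Int :=
  match PySem.List.min? queue (fun tup => tup.2.2.1) with
  | none => ((0, 0, 0, 0, 0), num_sec_tie)  -- unreachable under Pre_g_h: min() raises ValueError on []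
  | some mnode =>
    let best_g := mnode.2.2.1
    let nodes_with_best_g := queue.filter (fun val => val.2.2.1 == best_g)
    if nodes_with_best_g.length > 1 then
      let num_sec_tie' := num_sec_tie + 1
      let best_h := (PySem.List.min? (nodes_with_best_g.map (fun val => val.2.2.2.2)) (fun x => x)).getD 0
      let nodes_with_best_h := nodes_with_best_g.filter (fun val => val.2.2.2.2 == best_h)
      (nodes_with_best_h.headD (0, 0, 0, 0, 0), num_sec_tie')   -- [0]: list is nonempty under Pre_g_h
    else
      (nodes_with_best_g.headD (0, 0, 0, 0, 0), num_sec_tie)    -- [0]: list is nonempty under Pre_g_h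

-- ===== PORT B =====
def g_h_alt (queue : List (Int × Int × Int × Int × Int)) (num_sec_tie : Int) : (Int × Int × Int × Int × Int) × Int :=
  match queue with
  | [] => ((0, 0, 0, 0, 0), num_sec_tie)  -- unreachable under Pre_g_h: B raises ValueError on []
  | x :: rest =>
    let r := rest.foldl
      (fun (bc : (Int × Int × Int × Int × Int) × Int) t =>
        if t.2.2.1 < bc.1.2.2.1 then (t, 1)
        else if t.2.2.1 == bc.1.2.2.1 then
          ((if t.2.2.2.2 < bc.1.2.2.2.2 then t else bc.1), bc.2 + 1)
        else bc)
      (x, (1 : Int))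
    (r.1, if r.2 > 1 then num_sec_tie + 1 else num_sec_tie)

-- ===== PRECONDITION & SPEC =====
-- Pre_g_h excludes only the empty queue, on which A raises ValueError (from min()).
def Pre_g_h (queue : List (Int × Int × Int × Int × Int)) (num_sec_tie : Int) : Prop := queue ≠ []
instance (queue : List (Int × Int × Int × Int × Int)) (num_sec_tie : Int) : Decidable (Pre_g_h queue num_sec_tie) := by unfold Pre_g_h; infer_instance
def pvWitness_g_h : (List (Int × Int × Int × Int × Int)) × Int := ([(0, 0, 1, 0, 2), (1, 1, 1, 1, 1)], 0)
def Spec_g_h (queue : List (Int × Int × Int × Int × Int)) (num_sec_tie : Int) (out : (Int × Int × Int × Int × Int) × Int) : Prop := out = g_h_alt queue num_sec_tie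
instance (queue : List (Int × Int × Int × Int × Int)) (num_sec_tie : Int) (out : (Int × Int × Int × Int × Int) × Int) : Decidable (Spec_g_h queue num_sec_tie out) := by unfold Spec_g_h; infer_instance

-- ===== CLAIM (what is proved, stated in full; the proofs are below) =====
def Claim_equal_g_h : Prop := ∀ (queue : List (Int × Int × Int × Int × Int)) (num_sec_tie : Int), Dom_g_h queue num_sec_tie → Pre_g_h queue num_sec_tie → Spec_g_h queue num_sec_tie (g_h queue num_sec_tie)

-- ===== LEMMAS AND PROOFS =====

-- abbreviations for the two projections the programs compare
def pvG (t : Int × Int × Int × Int × Int) : Int := t.2.2.1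
def pvH (t : Int × Int × Int × Int × Int) : Int := t.2.2.2.2

-- the running minimum of g over a list, started at g0
def pvMg (g0 : Int) : List (Int × Int × Int × Int × Int) → Int
  | [] => g0
  | t :: r => pvMg (min g0 (pvG t)) r

-- B's fold step
def pvStep (bc : (Int × Int × Int × Int × Int) × Int) (t : Int × Int × Int × Int × Int) :
    (Int × Int × Int × Int × Int) × Int :=
  if pvG t < pvG bc.1 then (t, 1)
  else if pvG t == pvG bc.1 then
    ((if pvH t < pvH bc.1 then t else bc.1), bc.2 + 1)
  else bc

-- the node component of B's fold
def pvSel (b : Int × Int × Int × Int × Int) : List (Int × Int × Int × Int × Int) → (Int × Int × Int × Int × Int)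
  | [] => b
  | t :: r => pvSel (if pvG t < pvG b then t
                     else if pvG t = pvG b ∧ pvH t < pvH b then t else b) r

-- count of elements with g = m
def pvCnt (r : List (Int × Int × Int × Int × Int)) (m : Int) : Nat :=
  (r.filter (fun t => pvG t == m)).length

lemma pvMg_le (g0 : Int) (r : List (Int × Int × Int × Int × Int)) : pvMg g0 r ≤ g0 := by
  induction r generalizing g0 with
  | nil => simp [pvMg]
  | cons t r ih => exact le_trans (ih _) (min_le_left _ _)

lemma pvMg_le_mem (g0 : Int) (r : List (Int × Int × Int × Int × Int)) :
    ∀ y ∈ r, pvMg g0 r ≤ pvG y := by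
  induction r generalizing g0 with
  | nil => simp
  | cons t r ih =>
    intro y hy
    rcases List.mem_cons.mp hy with h | h
    · subst h
      show pvMg (min g0 (pvG y)) r ≤ pvG y
      exact le_trans (pvMg_le _ _) (min_le_right _ _)
    · exact ih _ y h

lemma pvMg_attained (g0 : Int) (r : List (Int × Int × Int × Int × Int)) :
    pvMg g0 r = g0 ∨ ∃ y ∈ r, pvMg g0 r = pvG y := by
  induction r generalizing g0 with
  | nil => exact Or.inl rfl
  | cons t r ih =>
    rcases ih (min g0 (pvG t)) with h | ⟨y, hy, hmy⟩
    · rcases le_total g0 (pvG t) with hle | hle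
      · exact Or.inl (by simpa [pvMg, min_eq_left hle] using h)
      · exact Or.inr ⟨t, List.mem_cons_self, by simpa [pvMg, min_eq_right hle] using h⟩
    · exact Or.inr ⟨y, List.mem_cons_of_mem _ hy, by simpa [pvMg] using hmy⟩

-- the fold's first component is pvSel
lemma pvFold_fst (r : List (Int × Int × Int × Int × Int)) (b : Int × Int × Int × Int × Int) (c : Int) :
    (r.foldl pvStep (b, c)).1 = pvSel b r := by
  induction r generalizing b c with
  | nil => rfl
  | cons t r ih =>
    simp only [List.foldl_cons, pvStep, pvSel]
    by_cases h1 : pvG t < pvG b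
    · simp [h1, ih]
    · by_cases h2 : pvG t = pvG b
      · by_cases h3 : pvH t < pvH b <;> simp [h2, h3, ih]
      · simp [h1, h2, ih]

-- the fold's second component: c plus/reset with the count of min-g elements
lemma pvFold_snd (r : List (Int × Int × Int × Int × Int)) (b : Int × Int × Int × Int × Int) (c : Int) :
    (r.foldl pvStep (b, c)).2 =
      if pvMg (pvG b) r = pvG b then c + (pvCnt r (pvMg (pvG b) r) : Int)
      else (pvCnt r (pvMg (pvG b) r) : Int) := by
  induction r generalizing b c with
  | nil => simp [pvMg, pvCnt]
  | cons t r ih =>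
    simp only [List.foldl_cons, pvStep, pvMg, pvCnt, List.filter_cons]
    by_cases h1 : pvG t < pvG b
    · rw [if_pos h1, ih, min_eq_right (le_of_lt h1)]
      have hlt : pvMg (pvG t) r < pvG b := lt_of_le_of_lt (pvMg_le _ _) h1
      have hle : pvMg (pvG t) r ≤ pvG t := pvMg_le _ _
      rw [if_neg (by omega : ¬ pvMg (pvG t) r = pvG b)]
      by_cases he : pvMg (pvG t) r = pvG t
      · simp [he, pvCnt]; ring_nf
      · rw [if_neg he]
        simp only [beq_iff_eq]
        rw [if_neg (fun h => he h.symm)]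
        rfl
    · rw [if_neg h1]
      by_cases h2 : pvG t = pvG b
      · rw [if_pos (beq_iff_eq.mpr h2), ih]
        have hbg : pvG (if pvH t < pvH b then t else b) = pvG b := by
          by_cases h3 : pvH t < pvH b <;> simp [h3, h2]
        rw [hbg, min_eq_left (le_of_eq h2.symm)]
        have hle : pvMg (pvG b) r ≤ pvG b := pvMg_le _ _
        by_cases hm : pvMg (pvG b) r = pvG b
        · rw [if_pos hm, if_pos hm]
          simp only [beq_iff_eq]
          rw [if_pos (h2.trans hm.symm)]
          simp [pvCnt]; ring
        · rw [if_neg hm, if_neg hm]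
          simp only [beq_iff_eq]
          rw [if_neg (fun h => hm (h.symm.trans h2))]
          simp [pvCnt]
      · rw [if_neg (by simpa using h2)]
        rw [ih, min_eq_left (by omega : pvG b ≤ pvG t)]
        have hle : pvMg (pvG b) r ≤ pvG b := pvMg_le _ _
        simp only [beq_iff_eq]
        rw [if_neg (by omega : ¬ pvG t = pvMg (pvG b) r)]
        simp [pvCnt]

-- lexicographic (g,h) order
def pvLexLe (a b : Int × Int × Int × Int × Int) : Prop :=
  pvG a < pvG b ∨ (pvG a = pvG b ∧ pvH a ≤ pvH b)

-- the node update of B's step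
def pvStepN (b t : Int × Int × Int × Int × Int) : Int × Int × Int × Int × Int :=
  if pvG t < pvG b then t else if pvG t = pvG b ∧ pvH t < pvH b then t else b

lemma pvLexLe_refl (a : Int × Int × Int × Int × Int) : pvLexLe a a := Or.inr ⟨rfl, le_refl _⟩

lemma pvLexLe_trans {a b c : Int × Int × Int × Int × Int} (h1 : pvLexLe a b) (h2 : pvLexLe b c) :
    pvLexLe a c := by
  unfold pvLexLe at *; rcases h1 with h1 | ⟨h1, h1'⟩ <;> rcases h2 with h2 | ⟨h2, h2'⟩ <;> omega

lemma pvStepN_le_left (b t : Int × Int × Int × Int × Int) : pvLexLe (pvStepN b t) b := by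
  unfold pvStepN pvLexLe
  split_ifs with h1 h2 <;> omega

lemma pvStepN_le_right (b t : Int × Int × Int × Int × Int) : pvLexLe (pvStepN b t) t := by
  unfold pvStepN pvLexLe
  split_ifs with h1 h2 <;> omega

lemma pvSel_cons (b t : Int × Int × Int × Int × Int) (r : List (Int × Int × Int × Int × Int)) :
    pvSel b (t :: r) = pvSel (pvStepN b t) r := rfl

-- pvSel is lex-≤ its seed
lemma pvSel_le_seed (r : List (Int × Int × Int × Int × Int)) (b : Int × Int × Int × Int × Int) :
    pvLexLe (pvSel b r) b := by
  induction r generalizing b with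
  | nil => exact pvLexLe_refl b
  | cons t r ih => exact pvLexLe_trans (ih (pvStepN b t)) (pvStepN_le_left b t)

-- pvSel is lex-minimal over all members
lemma pvSel_min (r : List (Int × Int × Int × Int × Int)) (b : Int × Int × Int × Int × Int) :
    ∀ y ∈ b :: r, pvLexLe (pvSel b r) y := by
  induction r generalizing b with
  | nil => intro y hy; simp at hy; subst hy; exact pvLexLe_refl _
  | cons t r ih =>
    intro y hy
    rcases List.mem_cons.mp hy with h | hy'
    · subst h
      exact pvLexLe_trans (pvSel_le_seed r (pvStepN y t)) (pvStepN_le_left y t)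
    · rcases List.mem_cons.mp hy' with h | h
      · subst h
        exact pvLexLe_trans (pvSel_le_seed r (pvStepN b y)) (pvStepN_le_right b y)
      · exact ih (pvStepN b t) y (List.mem_cons_of_mem _ h)

lemma pvSel_mem (r : List (Int × Int × Int × Int × Int)) (b : Int × Int × Int × Int × Int) :
    pvSel b r ∈ b :: r := by
  induction r generalizing b with
  | nil => exact List.mem_cons_self
  | cons t r ih =>
    rw [pvSel_cons]
    unfold pvStepN
    split_ifs with h1 h2
    · rcases List.mem_cons.mp (ih t) with h | h <;> simp [h]
    · rcases List.mem_cons.mp (ih t) with h | h <;> simp [h]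
    · rcases List.mem_cons.mp (ih b) with h | h <;> simp [h]

-- pvSel is the FIRST element of the list carrying its own (g,h) pair
lemma pvSel_eq_find (r : List (Int × Int × Int × Int × Int)) (b : Int × Int × Int × Int × Int) :
    (b :: r).find? (fun t => pvG t == pvG (pvSel b r) && pvH t == pvH (pvSel b r)) = some (pvSel b r) := by
  induction r generalizing b with
  | nil => simp [pvSel, List.find?]
  | cons t r ih =>
    rw [pvSel_cons]
    have hseed := pvSel_le_seed r (pvStepN b t)
    by_cases h1 : pvG t < pvG b
    · have ht : pvStepN b t = t := by unfold pvStepN; simp [h1]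
      rw [ht] at hseed ⊢
      have hb : ¬ (pvG b == pvG (pvSel t r) && pvH b == pvH (pvSel t r)) = true := by
        unfold pvLexLe at hseed
        simp only [Bool.and_eq_true, beq_iff_eq]
        omega
      rw [List.find?_cons_of_neg (p := fun u => pvG u == pvG (pvSel t r) && pvH u == pvH (pvSel t r)) hb]
      exact ih t
    · by_cases h2 : pvG t = pvG b ∧ pvH t < pvH b
      · have ht : pvStepN b t = t := by unfold pvStepN; simp [h2]
        rw [ht] at hseed ⊢
        have hb : ¬ (pvG b == pvG (pvSel t r) && pvH b == pvH (pvSel t r)) = true := by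
          unfold pvLexLe at hseed
          simp only [Bool.and_eq_true, beq_iff_eq]
          omega
        rw [List.find?_cons_of_neg (p := fun u => pvG u == pvG (pvSel t r) && pvH u == pvH (pvSel t r)) hb]
        exact ih t
      · have hbb : pvStepN b t = b := by unfold pvStepN; simp [h1, h2]
        rw [hbb] at hseed ⊢
        have ihb := ih b
        by_cases hpb : (pvG b == pvG (pvSel b r) && pvH b == pvH (pvSel b r)) = true
        · rw [List.find?_cons_of_pos (p := fun u => pvG u == pvG (pvSel b r) && pvH u == pvH (pvSel b r)) hpb] at ihb
          rw [List.find?_cons_of_pos (p := fun u => pvG u == pvG (pvSel b r) && pvH u == pvH (pvSel b r)) hpb]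
          exact ihb
        · have htf : ¬ (pvG t == pvG (pvSel b r) && pvH t == pvH (pvSel b r)) = true := by
            unfold pvLexLe at hseed
            simp only [Bool.and_eq_true, beq_iff_eq] at hpb ⊢
            omega
          rw [List.find?_cons_of_neg (p := fun u => pvG u == pvG (pvSel b r) && pvH u == pvH (pvSel b r)) hpb] at ihb
          rw [List.find?_cons_of_neg (p := fun u => pvG u == pvG (pvSel b r) && pvH u == pvH (pvSel b r)) hpb,
              List.find?_cons_of_neg (p := fun u => pvG u == pvG (pvSel b r) && pvH u == pvH (pvSel b r)) htf]
          exact ihb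

-- head of a filter is find?
lemma pvHead?_filter {α : Type} (p : α → Bool) (l : List α) : (l.filter p).head? = l.find? p := by
  induction l with
  | nil => rfl
  | cons a l ih =>
    by_cases h : p a = true
    · simp [h, List.find?_cons_of_pos h]
    · simp [h, List.find?_cons_of_neg h, ih]

-- members are ≥ the running minimum, and it is attained: m is THE minimum of g over x :: rest
lemma pvMg_le_all (x : Int × Int × Int × Int × Int) (rest : List (Int × Int × Int × Int × Int)) :
    ∀ y ∈ x :: rest, pvMg (pvG x) rest ≤ pvG y := by
  intro y hy
  rcases List.mem_cons.mp hy with h | h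
  · subst h; exact pvMg_le _ _
  · exact pvMg_le_mem _ _ y h

lemma pvMg_att (x : Int × Int × Int × Int × Int) (rest : List (Int × Int × Int × Int × Int)) :
    ∃ y ∈ x :: rest, pvMg (pvG x) rest = pvG y := by
  rcases pvMg_attained (pvG x) rest with h | ⟨y, hy, hm⟩
  · exact ⟨x, List.mem_cons_self, h⟩
  · exact ⟨y, List.mem_cons_of_mem _ hy, hm⟩

-- the selected node's g is the minimum
lemma pvG_sel (x : Int × Int × Int × Int × Int) (rest : List (Int × Int × Int × Int × Int)) :
    pvG (pvSel x rest) = pvMg (pvG x) rest := by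
  rcases pvMg_att x rest with ⟨y, hy, hm⟩
  have h1 := pvSel_min rest x y hy
  have h2 := pvMg_le_all x rest _ (pvSel_mem rest x)
  unfold pvLexLe at h1
  omega

-- the whole of B, written through pvStep
lemma pvAlt_eq (x : Int × Int × Int × Int × Int) (rest : List (Int × Int × Int × Int × Int)) (nst : Int) :
    g_h_alt (x :: rest) nst =
      ((rest.foldl pvStep (x, 1)).1, if (rest.foldl pvStep (x, 1)).2 > 1 then nst + 1 else nst) := rfl

-- ===== VERDICT (by name: the statement is the Claim_ definition above) =====
theorem g_h_spec : Claim_equal_g_h := by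
  unfold Claim_equal_g_h
  intro queue nst _ hpre
  unfold Spec_g_h
  match queue with
  | [] => exact absurd rfl hpre
  | x :: rest =>
    cases hmn : PySem.List.min? (x :: rest) (fun tup => tup.2.2.1) with
    | none => simp [PySem.List.min?_eq_none_iff] at hmn
    | some mn =>
      have hmem : mn ∈ x :: rest := PySem.List.min?_mem hmn
      have hisMin : ∀ y ∈ x :: rest, pvG mn ≤ pvG y := PySem.List.min?_isMin hmn
      have hGmn : pvG mn = pvMg (pvG x) rest := by
        rcases pvMg_att x rest with ⟨y, hy, hm⟩
        exact le_antisymm (hm ▸ hisMin y hy) (pvMg_le_all x rest mn hmem)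
      have hGs : pvG (pvSel x rest) = pvG mn := by rw [hGmn, pvG_sel]
      have hsnbg : pvSel x rest ∈ (x :: rest).filter (fun val => val.2.2.1 == mn.2.2.1) := by
        refine List.mem_filter.mpr ⟨pvSel_mem rest x, ?_⟩
        simpa [pvG] using hGs
      have hlen : (((x :: rest).filter (fun val => val.2.2.1 == mn.2.2.1)).length : Int) =
          (rest.foldl pvStep (x, 1)).2 := by
        rw [pvFold_snd]
        rw [← hGmn]
        show (((x :: rest).filter (fun val => pvG val == pvG mn)).length : Int) = _
        rw [List.filter_cons]
        by_cases hx : pvG x = pvG mn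
        · rw [if_pos (by simpa using hx), if_pos (by omega : pvG mn = pvG x)]
          simp only [pvCnt, List.length_cons]
          push_cast; ring
        · rw [if_neg (by simpa using hx), if_neg (by omega : ¬ pvG mn = pvG x)]
          simp only [pvCnt]
      unfold g_h
      rw [hmn]
      simp only []
      rw [pvAlt_eq, pvFold_fst]
      by_cases hgt : ((x :: rest).filter (fun val => val.2.2.1 == mn.2.2.1)).length > 1
      · rw [if_pos hgt, if_pos (by rw [← hlen]; exact_mod_cast hgt)]
        -- tie case: the h-minimum
        have hne : (((x :: rest).filter (fun val => val.2.2.1 == mn.2.2.1)).map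
            (fun val => val.2.2.2.2)) ≠ [] := by
          intro h
          exact absurd (List.map_eq_nil_iff.mp h) (List.ne_nil_of_mem hsnbg)
        cases hmh : PySem.List.min? (((x :: rest).filter (fun val => val.2.2.1 == mn.2.2.1)).map
            (fun val => val.2.2.2.2)) (fun v => v) with
        | none => exact absurd (Iff.mp (PySem.List.min?_eq_none_iff _ _) hmh) hne
        | some mh =>
          have hHs : pvH (pvSel x rest) = mh := by
            have h1 : mh ≤ pvH (pvSel x rest) :=
              PySem.List.min?_isMin hmh _ (List.mem_map.mpr ⟨_, hsnbg, rfl⟩)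
            rcases List.mem_map.mp (PySem.List.min?_mem hmh) with ⟨y, hynbg, hyh⟩
            rcases List.mem_filter.mp hynbg with ⟨hyq, hyg⟩
            have h2 := pvSel_min rest x y hyq
            unfold pvLexLe at h2
            have hgy : pvG y = pvG mn := by simpa [pvG] using hyg
            have hyh' : pvH y = mh := hyh
            omega
          rw [Option.getD_some]
          -- the doubly-filtered head is the selected node
          have hff : ((x :: rest).filter (fun val => val.2.2.1 == mn.2.2.1)).filter
                (fun val => val.2.2.2.2 == mh) =
              (x :: rest).filter (fun t => pvG t == pvG (pvSel x rest) && pvH t == pvH (pvSel x rest)) := by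
            rw [List.filter_filter]
            apply List.filter_congr
            intro t _
            rw [show mn.2.2.1 = (pvSel x rest).2.2.1 from hGs.symm,
                show mh = (pvSel x rest).2.2.2.2 from hHs.symm]
            exact Bool.and_comm _ _
          rw [hff]
          have hhd : ((x :: rest).filter
              (fun t => pvG t == pvG (pvSel x rest) && pvH t == pvH (pvSel x rest))).head? =
              some (pvSel x rest) := by
            rw [pvHead?_filter]
            exact pvSel_eq_find rest x
          simp [List.headD_eq_head?_getD, hhd]
      · rw [if_neg hgt, if_neg (by rw [← hlen]; exact_mod_cast hgt)]
        have hone : ((x :: rest).filter (fun val => val.2.2.1 == mn.2.2.1)).length = 1 := by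
          have := List.length_pos_of_mem hsnbg
          omega
        rcases List.length_eq_one_iff.mp hone with ⟨a, ha⟩
        have hsa : pvSel x rest = a := by
          have := hsnbg
          rw [ha] at this
          simpa using this
        rw [ha]
        simp [hsa]
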